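-- pv_equiv track=rewrite | github.com/snw7/fls-hack-26 | backend/app/service.py | _build_normalized_index
-- ===== SOURCE A (Python) =====
-- def _build_normalized_index(markdown: str) -> tuple[str, list[int]]:
--     normalized_chars: list[str] = []
--     raw_index_by_normalized_index: list[int] = []
--     pending_space_index: int | None = None
--     at_line_start = True
--
--     for index, character in enumerate(markdown):
--         if at_line_start:
--             if character in (" ", "\t"):
--                 continue
--             if character == ">" and index + 1 < len(markdown) and markdown[index + 1] == " ":
--                 continue
--             if character == "#":
--                 marker_end = index
--                 while marker_end < len(markdown) and markdown[marker_end] == "#":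
--                     marker_end += 1
--                 if marker_end < len(markdown) and markdown[marker_end] == " ":
--                     continue
--             if character in ("-", "*", "+") and index + 1 < len(markdown) and markdown[index + 1] == " ":
--                 continue
--             if character.isdigit():
--                 marker_end = index
--                 while marker_end < len(markdown) and markdown[marker_end].isdigit():
--                     marker_end += 1
--                 if (
--                     marker_end + 1 < len(markdown)
--                     and markdown[marker_end] == "."
--                     and markdown[marker_end + 1] == " "
--                 ):
--                     continue
--             at_line_start = False
--
--         if character.isspace():
--             if normalized_chars and pending_space_index is None:
--                 pending_space_index = index
--             if character == "\n":
--                 at_line_start = True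
--             continue
--
--         if pending_space_index is not None:
--             normalized_chars.append(" ")
--             raw_index_by_normalized_index.append(pending_space_index)
--             pending_space_index = None
--
--         normalized_chars.append(character)
--         raw_index_by_normalized_index.append(index)
--
--     return "".join(normalized_chars), raw_index_by_normalized_index
-- ===== SOURCE B (Python) =====
-- def _skip_line_start(s, i):
--     n = len(s)
--     while i < n:
--         c = s[i]
--         if c in (" ", "\t"):
--             i += 1
--         elif c == ">" and i + 1 < n and s[i + 1] == " ":
--             i += 1
--         elif c == "#":
--             j = i
--             while j < n and s[j] == "#":
--                 j += 1
--             if j < n and s[j] == " ":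
--                 i = j
--             else:
--                 break
--         elif c in ("-", "*", "+") and i + 1 < n and s[i + 1] == " ":
--             i += 1
--         elif c.isdigit():
--             j = i
--             while j < n and s[j].isdigit():
--                 j += 1
--             if j + 1 < n and s[j] == "." and s[j + 1] == " ":
--                 i = j
--             else:
--                 break
--         else:
--             break
--     return i
--
--
-- def _tokens(s):
--     n = len(s)
--     out = []
--     i = 0
--     while i < n:
--         i = _skip_line_start(s, i)
--         while i < n:
--             c = s[i]
--             out.append((i, c))
--             i += 1
--             if c == "\n":
--                 break
--     return out
--
--
-- def _build_normalized_index(markdown):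
--     chars = []
--     idxs = []
--     pending = None
--     for i, c in _tokens(markdown):
--         if c.isspace():
--             if chars and pending is None:
--                 pending = i
--         else:
--             if pending is not None:
--                 chars.append(" ")
--                 idxs.append(pending)
--                 pending = None
--             chars.append(c)
--             idxs.append(i)
--     return "".join(chars), idxs
-- ===== Notes on version B (the rewrite author's own statement) =====
-- stated objective: alternative
-- what changed: A's single fused state machine (one enumerate loop juggling at_line_start, pending-space and output together, re-scanning marker runs per character) is decomposed into a line-start marker skipper that jumps over whole marker runs, a (raw_index, char) token-stream builder, and a separate whitespace-collapsing fold over the tokens.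
import Mathlib
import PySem

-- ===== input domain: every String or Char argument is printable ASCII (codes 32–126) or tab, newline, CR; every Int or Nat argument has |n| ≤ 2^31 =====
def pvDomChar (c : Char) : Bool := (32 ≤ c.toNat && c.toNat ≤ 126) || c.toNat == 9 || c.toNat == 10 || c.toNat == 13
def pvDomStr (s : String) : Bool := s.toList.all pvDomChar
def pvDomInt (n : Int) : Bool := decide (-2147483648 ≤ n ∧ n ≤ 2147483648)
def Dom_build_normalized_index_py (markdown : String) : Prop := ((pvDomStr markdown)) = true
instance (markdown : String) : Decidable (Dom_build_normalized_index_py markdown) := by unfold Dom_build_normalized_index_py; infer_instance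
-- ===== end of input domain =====

-- B restructures A's fused one-pass state machine as a line-start marker skipper + token-stream builder + whitespace-collapse fold (alternative decomposition, same cost).
-- All loops are ported with an explicit fuel argument (always called with enough fuel; at exhaustion the position is past the
-- end, where the Python while-condition is false too, so the values are exact).

-- ===== PORT A =====

-- while marker_end < len(cs) and pred(cs[marker_end]): marker_end += 1   (shared by both ports)
def pvScanEnd (cs : List Char) (pred : Char → Bool) : Nat → Nat → Nat
  | 0, j => j
  | fuel+1, j => if j < cs.length ∧ pred (cs.getD j ' ') then pvScanEnd cs pred fuel (j+1) else j

-- the five line-start 'continue' conditions of A, in source order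
def pvAskip (cs : List Char) (i : Nat) : Bool :=
  (cs.getD i ' ' == ' ' || cs.getD i ' ' == '\t') ||
  (cs.getD i ' ' == '>' && decide (i+1 < cs.length) && (cs.getD (i+1) ' ' == ' ')) ||
  (cs.getD i ' ' == '#' && decide (pvScanEnd cs (· == '#') cs.length i < cs.length) &&
     (cs.getD (pvScanEnd cs (· == '#') cs.length i) ' ' == ' ')) ||
  ((cs.getD i ' ' == '-' || cs.getD i ' ' == '*' || cs.getD i ' ' == '+') &&
     decide (i+1 < cs.length) && (cs.getD (i+1) ' ' == ' ')) ||
  (PySem.Chars.isdigit (cs.getD i ' ') &&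
     decide (pvScanEnd cs PySem.Chars.isdigit cs.length i + 1 < cs.length) &&
     (cs.getD (pvScanEnd cs PySem.Chars.isdigit cs.length i) ' ' == '.') &&
     (cs.getD (pvScanEnd cs PySem.Chars.isdigit cs.length i + 1) ' ' == ' '))

-- A's for-loop over enumerate(markdown), state (normalized_chars, raw_idx, pending_space_index, at_line_start)
def pvLoopA (cs : List Char) : Nat → Nat → List Char → List Int → Option Int → Bool → String × List Int
  | 0, _, norm, idxs, _, _ => (String.ofList norm, idxs)
  | fuel+1, i, norm, idxs, pending, als =>
    if i < cs.length then
      if als && pvAskip cs i then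
        pvLoopA cs fuel (i+1) norm idxs pending true
      else if PySem.Chars.isspace (cs.getD i ' ') then
        pvLoopA cs fuel (i+1) norm idxs
          (if !norm.isEmpty && pending.isNone then some (i : Int) else pending)
          (cs.getD i ' ' == '\n')
      else
        pvLoopA cs fuel (i+1)
          ((if pending.isSome then norm ++ [' '] else norm) ++ [cs.getD i ' '])
          ((if pending.isSome then idxs ++ [pending.getD 0] else idxs) ++ [(i : Int)])
          none false
    else (String.ofList norm, idxs)

def build_normalized_index_py (markdown : String) : String × List Int :=
  pvLoopA markdown.toList markdown.toList.length 0 [] [] none true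

-- ===== PORT B =====

-- _skip_line_start(s, i)
def pvSkipLS (cs : List Char) : Nat → Nat → Nat
  | 0, i => i
  | fuel+1, i =>
    if i < cs.length then
      if cs.getD i ' ' == ' ' || cs.getD i ' ' == '\t' then pvSkipLS cs fuel (i+1)
      else if cs.getD i ' ' == '>' && decide (i+1 < cs.length) && (cs.getD (i+1) ' ' == ' ') then
        pvSkipLS cs fuel (i+1)
      else if cs.getD i ' ' == '#' then
        if decide (pvScanEnd cs (· == '#') cs.length i < cs.length) &&
           (cs.getD (pvScanEnd cs (· == '#') cs.length i) ' ' == ' ') then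
          pvSkipLS cs fuel (pvScanEnd cs (· == '#') cs.length i)
        else i
      else if (cs.getD i ' ' == '-' || cs.getD i ' ' == '*' || cs.getD i ' ' == '+') &&
              decide (i+1 < cs.length) && (cs.getD (i+1) ' ' == ' ') then
        pvSkipLS cs fuel (i+1)
      else if PySem.Chars.isdigit (cs.getD i ' ') then
        if decide (pvScanEnd cs PySem.Chars.isdigit cs.length i + 1 < cs.length) &&
           (cs.getD (pvScanEnd cs PySem.Chars.isdigit cs.length i) ' ' == '.') &&
           (cs.getD (pvScanEnd cs PySem.Chars.isdigit cs.length i + 1) ' ' == ' ') then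
          pvSkipLS cs fuel (pvScanEnd cs PySem.Chars.isdigit cs.length i)
        else i
      else i
    else i

-- _tokens(s): the outer/inner while pair as one fueled loop; atStart=true is the head of the outer
-- loop (skip markers, fall into the line body), atStart=false is the inner per-line loop
def pvTok (cs : List Char) : Nat → Nat → Bool → List (Int × Char)
  | 0, _, _ => []
  | fuel+1, i, atStart =>
    if i < cs.length then
      if atStart then
        pvTok cs fuel (pvSkipLS cs (cs.length + 1) i) false
      else
        ((i : Int), cs.getD i ' ') :: pvTok cs fuel (i+1) (cs.getD i ' ' == '\n')
    else []

-- the body of B's collapsing for-loop over the token stream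
def pvColStep (st : List Char × List Int × Option Int) (t : Int × Char) :
    List Char × List Int × Option Int :=
  if PySem.Chars.isspace t.2 then
    (st.1, st.2.1, if !st.1.isEmpty && st.2.2.isNone then some t.1 else st.2.2)
  else
    ((if st.2.2.isSome then st.1 ++ [' '] else st.1) ++ [t.2],
     (if st.2.2.isSome then st.2.1 ++ [st.2.2.getD 0] else st.2.1) ++ [t.1], none)

def build_normalized_index_py_alt (markdown : String) : String × List Int :=
  let st := (pvTok markdown.toList (2 * markdown.toList.length + 2) 0 true).foldl pvColStep ([], [], none)
  (String.ofList st.1, st.2.1)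

-- ===== PRECONDITION & SPEC =====
def Spec_build_normalized_index_py (markdown : String) (out : String × List Int) : Prop := out = build_normalized_index_py_alt markdown
instance (markdown : String) (out : String × List Int) : Decidable (Spec_build_normalized_index_py markdown out) := by unfold Spec_build_normalized_index_py; infer_instance

-- ===== CLAIM (what is proved, stated in full; the proofs are below) =====
def Claim_equal_build_normalized_index_py : Prop := ∀ (markdown : String), Dom_build_normalized_index_py markdown → Spec_build_normalized_index_py markdown (build_normalized_index_py markdown)

-- ===== LEMMAS AND PROOFS =====

-- result assembly shared by the proofs: final state -> returned pair
def pvFin (st : List Char × List Int × Option Int) : String × List Int :=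
  (String.ofList st.1, st.2.1)

theorem pvScanEnd_out (cs : List Char) (pred : Char → Bool) (f j : Nat)
    (h : ¬ j < cs.length) : pvScanEnd cs pred f j = j := by
  cases f with
  | zero => rfl
  | succ f => rw [pvScanEnd, if_neg (fun hc => h hc.1)]

theorem pvScanEnd_ge (cs : List Char) (pred : Char → Bool) :
    ∀ f j, j ≤ pvScanEnd cs pred f j := by
  intro f
  induction f with
  | zero => intro j; exact le_rfl
  | succ f ih =>
    intro j
    rw [pvScanEnd]
    split
    · exact le_trans (Nat.le_succ j) (ih (j+1))
    · exact le_rfl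

theorem pvScanEnd_irrel (cs : List Char) (pred : Char → Bool) :
    ∀ f g j, cs.length - j ≤ f → cs.length - j ≤ g →
      pvScanEnd cs pred f j = pvScanEnd cs pred g j := by
  intro f
  induction f with
  | zero =>
    intro g j hf _
    have hj : ¬ j < cs.length := by omega
    rw [pvScanEnd_out cs pred 0 j hj, pvScanEnd_out cs pred g j hj]
  | succ f ih =>
    intro g j hf hg
    by_cases hj : j < cs.length
    · cases g with
      | zero => omega
      | succ g =>
        rw [pvScanEnd, pvScanEnd]
        split
        · exact ih g (j+1) (by omega) (by omega)
        · rfl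
    · rw [pvScanEnd_out cs pred _ j hj, pvScanEnd_out cs pred g j hj]

theorem pvScanEnd_step (cs : List Char) (pred : Char → Bool) (f j : Nat)
    (hf : cs.length - j ≤ f) (h : j < cs.length) (hp : pred (cs.getD j ' ') = true) :
    pvScanEnd cs pred f j = pvScanEnd cs pred f (j+1) := by
  cases f with
  | zero => omega
  | succ f =>
    rw [pvScanEnd, if_pos ⟨h, hp⟩]
    exact pvScanEnd_irrel cs pred f (f+1) (j+1) (by omega) (by omega)

theorem pvScanEnd_lt (cs : List Char) (pred : Char → Bool) (f j : Nat)
    (hf : 0 < f) (h : j < cs.length) (hp : pred (cs.getD j ' ') = true) :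
    j < pvScanEnd cs pred f j := by
  cases f with
  | zero => omega
  | succ f =>
    rw [pvScanEnd, if_pos ⟨h, hp⟩]
    exact lt_of_lt_of_le (Nat.lt_succ_self j) (pvScanEnd_ge cs pred f (j+1))

theorem pvDigitNe (c : Char) (h : PySem.Chars.isdigit c = true) :
    (c == ' ') = false ∧ (c == '\t') = false ∧ (c == '>') = false ∧ (c == '#') = false ∧
    (c == '-') = false ∧ (c == '*') = false ∧ (c == '+') = false := by
  simp only [PySem.Chars.isdigit, Bool.and_eq_true, decide_eq_true_eq] at h
  obtain ⟨h1, h2⟩ := h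
  refine ⟨?_, ?_, ?_, ?_, ?_, ?_, ?_⟩ <;>
    (simp only [beq_eq_false_iff_ne, ne_eq]; rintro rfl) <;>
    first
      | exact absurd h1 (by decide)
      | exact absurd h2 (by decide)

theorem pvNotSpace_ne_nl (c : Char) (h : PySem.Chars.isspace c = false) :
    (c == '\n') = false := by
  by_cases hc : c = '\n'
  · subst hc; exact absurd h (by decide)
  · simp [hc]

theorem pvSkipLS_ge (cs : List Char) : ∀ f i, i ≤ pvSkipLS cs f i := by
  intro f
  induction f with
  | zero => intro i; exact le_rfl
  | succ f ih =>
    intro i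
    rw [pvSkipLS]
    split
    · rename_i h
      split
      · exact le_trans (Nat.le_succ i) (ih (i+1))
      · split
        · exact le_trans (Nat.le_succ i) (ih (i+1))
        · split
          · rename_i h3
            split
            · exact le_trans (le_of_lt (pvScanEnd_lt cs (· == '#') cs.length i (by omega) h h3))
                (ih _)
            · exact le_rfl
          · split
            · exact le_trans (Nat.le_succ i) (ih (i+1))
            · split
              · rename_i h5
                split
                · exact le_trans (le_of_lt (pvScanEnd_lt cs PySem.Chars.isdigit cs.length i (by omega) h h5))
                    (ih _)
                · exact le_rfl
              · exact le_rfl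
    · exact le_rfl

theorem pvSkipLS_irrel (cs : List Char) :
    ∀ f g i, cs.length - i < f → cs.length - i < g → pvSkipLS cs f i = pvSkipLS cs g i := by
  intro f
  induction f with
  | zero => intro g i hf _; omega
  | succ f ih =>
    intro g i hf hg
    cases g with
    | zero => omega
    | succ g =>
      rw [pvSkipLS, pvSkipLS]
      split
      · rename_i h
        split
        · exact ih g (i+1) (by omega) (by omega)
        · split
          · exact ih g (i+1) (by omega) (by omega)
          · split
            · rename_i h3
              split
              · have hlt := pvScanEnd_lt cs (· == '#') cs.length i (by omega) h h3
                exact ih g _ (by omega) (by omega)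
              · rfl
            · split
              · exact ih g (i+1) (by omega) (by omega)
              · split
                · rename_i h5
                  split
                  · have hlt := pvScanEnd_lt cs PySem.Chars.isdigit cs.length i (by omega) h h5
                    exact ih g _ (by omega) (by omega)
                  · rfl
                · rfl
      · rfl

theorem pvSkipLS_stop (cs : List Char) (f i : Nat) (h : i < cs.length)
    (hA : pvAskip cs i = false) : pvSkipLS cs f i = i := by
  cases f with
  | zero => rfl
  | succ f =>
    simp only [pvAskip, Bool.or_eq_false_iff] at hA
    obtain ⟨⟨⟨⟨hA1, hA2⟩, hA3⟩, hA4⟩, hA5⟩ := hA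
    rw [pvSkipLS, if_pos h, if_neg (by rw [hA1.1, hA1.2]; decide), if_neg (by rw [hA2]; decide)]
    by_cases hc3 : (cs.getD i ' ' == '#') = true
    · rw [hc3, Bool.true_and] at hA3
      rw [if_pos hc3, if_neg (by rw [hA3]; decide)]
    · rw [if_neg hc3, if_neg (by rw [hA4]; decide)]
      by_cases hc5 : PySem.Chars.isdigit (cs.getD i ' ') = true
      · rw [hc5, Bool.true_and] at hA5
        rw [if_pos hc5, if_neg (by rw [hA5]; decide)]
      · rw [if_neg hc5]

theorem pvSkipLS_step (cs : List Char) (f i : Nat) (hf : cs.length - i < f)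
    (h : i < cs.length) (hA : pvAskip cs i = true) :
    pvSkipLS cs f i = pvSkipLS cs f (i+1) := by
  cases f with
  | zero => omega
  | succ f =>
    have hirrel : ∀ j, cs.length - j < f → pvSkipLS cs f j = pvSkipLS cs (f+1) j :=
      fun j hj => pvSkipLS_irrel cs f (f+1) j hj (by omega)
    simp only [pvAskip, Bool.or_eq_true] at hA
    conv_lhs => rw [pvSkipLS]
    rw [if_pos h]
    rcases hA with ((((ha | hb) | hA2) | hA3) | hA4) | hA5
    · rw [if_pos (by rw [ha, Bool.true_or])]
      exact hirrel (i+1) (by omega)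
    · rw [if_pos (by rw [hb, Bool.or_true])]
      exact hirrel (i+1) (by omega)
    · rw [Bool.and_eq_true, Bool.and_eq_true] at hA2
      obtain ⟨⟨hc, hd⟩, he⟩ := hA2
      have hceq : cs.getD i ' ' = '>' := eq_of_beq hc
      rw [if_neg (by rw [hceq]; decide),
        if_pos (by rw [Bool.and_eq_true, Bool.and_eq_true]; exact ⟨⟨hc, hd⟩, he⟩)]
      exact hirrel (i+1) (by omega)
    · rw [Bool.and_eq_true, Bool.and_eq_true] at hA3
      obtain ⟨⟨hc, hd⟩, he⟩ := hA3
      have hceq : cs.getD i ' ' = '#' := eq_of_beq hc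
      rw [if_neg (by rw [hceq]; decide), if_neg (by rw [hceq]; simp), if_pos hc,
        if_pos (by rw [Bool.and_eq_true]; exact ⟨hd, he⟩)]
      have hsc := pvScanEnd_step cs (· == '#') cs.length i (by omega) h hc
      rw [hsc] at hd he ⊢
      have hge2 := pvScanEnd_ge cs (· == '#') cs.length (i+1)
      have hdlt := of_decide_eq_true hd
      have hlt2 : i + 1 < cs.length := by omega
      by_cases h2b : (cs.getD (i+1) ' ' == '#') = true
      · have h2eq : cs.getD (i+1) ' ' = '#' := eq_of_beq h2b
        conv_rhs => rw [pvSkipLS]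
        rw [if_pos hlt2, if_neg (by rw [h2eq]; decide), if_neg (by rw [h2eq]; simp), if_pos h2b,
          if_pos (by rw [Bool.and_eq_true]; exact ⟨hd, he⟩)]
      · have hsc2 : pvScanEnd cs (· == '#') cs.length (i+1) = i+1 := by
          rw [show cs.length = cs.length - 1 + 1 from by omega, pvScanEnd,
            if_neg (fun hcc => h2b hcc.2)]
        rw [hsc2]
        exact hirrel (i+1) (by omega)
    · rw [Bool.and_eq_true, Bool.and_eq_true] at hA4
      obtain ⟨⟨hor, hd⟩, he⟩ := hA4
      have hif : ((cs.getD i ' ' == '-' || cs.getD i ' ' == '*' || cs.getD i ' ' == '+') &&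
          decide (i + 1 < cs.length) && (cs.getD (i+1) ' ' == ' ')) = true := by
        rw [Bool.and_eq_true, Bool.and_eq_true]; exact ⟨⟨hor, hd⟩, he⟩
      rw [Bool.or_eq_true, Bool.or_eq_true] at hor
      rcases hor with (h' | h') | h' <;>
        rw [if_neg (by rw [eq_of_beq h']; decide), if_neg (by rw [eq_of_beq h']; simp),
          if_neg (by rw [eq_of_beq h']; decide), if_pos hif] <;>
        exact hirrel (i+1) (by omega)
    · rw [Bool.and_eq_true, Bool.and_eq_true, Bool.and_eq_true] at hA5
      obtain ⟨⟨⟨hc, hd⟩, he⟩, hf5⟩ := hA5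
      have hne := pvDigitNe _ hc
      rw [if_neg (by rw [hne.1, hne.2.1]; decide),
        if_neg (by rw [hne.2.2.1, Bool.false_and, Bool.false_and]; decide),
        if_neg (by rw [hne.2.2.2.1]; decide),
        if_neg (by rw [hne.2.2.2.2.1, hne.2.2.2.2.2.1, hne.2.2.2.2.2.2,
          Bool.false_or, Bool.false_or, Bool.false_and, Bool.false_and]; decide),
        if_pos hc, if_pos (by rw [Bool.and_eq_true, Bool.and_eq_true]; exact ⟨⟨hd, he⟩, hf5⟩)]
      have hsc := pvScanEnd_step cs PySem.Chars.isdigit cs.length i (by omega) h hc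
      rw [hsc] at hd he hf5 ⊢
      have hge2 := pvScanEnd_ge cs PySem.Chars.isdigit cs.length (i+1)
      have hdlt := of_decide_eq_true hd
      have hlt2 : i + 1 < cs.length := by omega
      by_cases h2b : PySem.Chars.isdigit (cs.getD (i+1) ' ') = true
      · have hne2 := pvDigitNe _ h2b
        conv_rhs => rw [pvSkipLS]
        rw [if_pos hlt2, if_neg (by rw [hne2.1, hne2.2.1]; decide),
          if_neg (by rw [hne2.2.2.1, Bool.false_and, Bool.false_and]; decide),
          if_neg (by rw [hne2.2.2.2.1]; decide),
          if_neg (by rw [hne2.2.2.2.2.1, hne2.2.2.2.2.2.1, hne2.2.2.2.2.2.2,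
            Bool.false_or, Bool.false_or, Bool.false_and, Bool.false_and]; decide),
          if_pos h2b, if_pos (by rw [Bool.and_eq_true, Bool.and_eq_true]; exact ⟨⟨hd, he⟩, hf5⟩)]
      · have hsc2 : pvScanEnd cs PySem.Chars.isdigit cs.length (i+1) = i+1 := by
          rw [show cs.length = cs.length - 1 + 1 from by omega, pvScanEnd,
            if_neg (fun hcc => h2b hcc.2)]
        rw [hsc2]
        exact hirrel (i+1) (by omega)

theorem pvTok_out (cs : List Char) (f i : Nat) (m : Bool) (h : ¬ i < cs.length) :
    pvTok cs f i m = [] := by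
  cases f with
  | zero => rfl
  | succ f => rw [pvTok, if_neg h]

-- the fuel a pvTok call needs from position i in mode m
def pvTokNeed (cs : List Char) (i : Nat) (m : Bool) : Nat :=
  2 * (cs.length - i) + (if m then 2 else 1)

theorem pvTokNeed_true (cs : List Char) (i : Nat) :
    pvTokNeed cs i true = 2 * (cs.length - i) + 2 := rfl

theorem pvTokNeed_false (cs : List Char) (i : Nat) :
    pvTokNeed cs i false = 2 * (cs.length - i) + 1 := rfl

theorem pvTokNeed_le (cs : List Char) (i : Nat) (m : Bool) :
    pvTokNeed cs i m ≤ 2 * (cs.length - i) + 2 := by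
  cases m
  · rw [pvTokNeed_false]; omega
  · rw [pvTokNeed_true]

theorem pvTok_irrel (cs : List Char) :
    ∀ f g i m, pvTokNeed cs i m ≤ f → pvTokNeed cs i m ≤ g →
      pvTok cs f i m = pvTok cs g i m := by
  intro f
  induction f with
  | zero =>
    intro g i m hf _
    cases m
    · rw [pvTokNeed_false] at hf; omega
    · rw [pvTokNeed_true] at hf; omega
  | succ f ih =>
    intro g i m hf hg
    cases g with
    | zero =>
      cases m
      · rw [pvTokNeed_false] at hg; omega
      · rw [pvTokNeed_true] at hg; omega
    | succ g =>
      rw [pvTok, pvTok]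
      by_cases h : i < cs.length
      · rw [if_pos h, if_pos h]
        cases m with
        | true =>
          rw [pvTokNeed_true] at hf hg
          simp only [if_true]
          have hge := pvSkipLS_ge cs (cs.length + 1) i
          exact ih g (pvSkipLS cs (cs.length + 1) i) false
            (by rw [pvTokNeed_false]; omega) (by rw [pvTokNeed_false]; omega)
        | false =>
          rw [pvTokNeed_false] at hf hg
          simp only [Bool.false_eq_true, if_false]
          congr 1
          have hb := pvTokNeed_le cs (i+1) (cs.getD i ' ' == '\n')
          exact ih g (i+1) _ (by omega) (by omega)
      · rw [if_neg h, if_neg h]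

theorem pvTok_shift (cs : List Char) (f i : Nat) (h : i < cs.length)
    (hA : pvAskip cs i = true) (hf : pvTokNeed cs i true ≤ f) :
    pvTok cs f i true = pvTok cs f (i+1) true := by
  cases f with
  | zero => rw [pvTokNeed_true] at hf; omega
  | succ f =>
    rw [pvTok, pvTok, if_pos h]
    have hskip : pvSkipLS cs (cs.length + 1) i = pvSkipLS cs (cs.length + 1) (i+1) :=
      pvSkipLS_step cs (cs.length + 1) i (by omega) h hA
    by_cases h2 : i + 1 < cs.length
    · rw [if_pos h2]
      simp only [if_true, hskip]
    · rw [if_neg h2]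
      simp only [if_true, hskip]
      have hs2 : pvSkipLS cs (cs.length + 1) (i+1) = i+1 := by
        rw [pvSkipLS, if_neg h2]
      rw [hs2]
      exact pvTok_out cs f (i+1) false h2
    
theorem pvTok_enter (cs : List Char) (f i : Nat) (h : i < cs.length)
    (hA : pvAskip cs i = false) (hf : pvTokNeed cs i true ≤ f) :
    pvTok cs f i true = pvTok cs f i false := by
  cases f with
  | zero => rw [pvTokNeed_true] at hf; omega
  | succ f =>
    conv_lhs => rw [pvTok]
    rw [if_pos h]
    simp only [if_true]
    rw [pvSkipLS_stop cs (cs.length + 1) i h hA]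
    rw [pvTokNeed_true] at hf
    exact pvTok_irrel cs f (f+1) i false (by rw [pvTokNeed_false]; omega)
      (by rw [pvTokNeed_false]; omega)

theorem pvLoopA_true_false (cs : List Char) (f i : Nat) (norm : List Char) (idxs : List Int)
    (pending : Option Int) (_h : i < cs.length) (hA : pvAskip cs i = false) :
    pvLoopA cs (f+1) i norm idxs pending true = pvLoopA cs (f+1) i norm idxs pending false := by
  rw [pvLoopA.eq_2, pvLoopA.eq_2]
  simp [hA]

theorem pvMain (cs : List Char) : ∀ fA i, cs.length - i ≤ fA →
    ∀ fT (norm : List Char) (idxs : List Int) (pending : Option Int),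
    (pvTokNeed cs i true ≤ fT →
      pvLoopA cs fA i norm idxs pending true =
        pvFin ((pvTok cs fT i true).foldl pvColStep (norm, idxs, pending))) ∧
    (pvTokNeed cs i false ≤ fT →
      pvLoopA cs fA i norm idxs pending false =
        pvFin ((pvTok cs fT i false).foldl pvColStep (norm, idxs, pending))) := by
  intro fA
  induction fA with
  | zero =>
    intro i hk fT norm idxs pending
    have hn : ¬ i < cs.length := by omega
    rw [pvTok_out cs fT i true hn, pvTok_out cs fT i false hn]
    exact ⟨fun _ => rfl, fun _ => rfl⟩
  | succ fA ih =>
    intro i hk fT norm idxs pending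
    by_cases h : i < cs.length
    · -- content step (the at_line_start = False path), proved once and used by both parts
      have hct : pvTokNeed cs i false ≤ fT →
          pvLoopA cs (fA+1) i norm idxs pending false =
            pvFin ((pvTok cs fT i false).foldl pvColStep (norm, idxs, pending)) := by
        intro hfT
        obtain ⟨fT', rfl⟩ : ∃ fT', fT = fT' + 1 := by
          cases fT with
          | zero => rw [pvTokNeed_false] at hfT; omega
          | succ fT' => exact ⟨fT', rfl⟩
        rw [pvTok, if_pos h]
        simp only [Bool.false_eq_true, if_false]
        rw [List.foldl_cons]
        conv_lhs => rw [pvLoopA.eq_2]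
        rw [if_pos h, if_neg (by simp)]
        by_cases hsp : PySem.Chars.isspace (cs.getD i ' ') = true
        · rw [if_pos hsp]
          have hcol : pvColStep (norm, idxs, pending) ((i : Int), cs.getD i ' ') =
              (norm, idxs, if !norm.isEmpty && pending.isNone then some (i : Int) else pending) := by
            simp only [pvColStep]
            rw [if_pos hsp]
          rw [hcol]
          by_cases hnl : (cs.getD i ' ' == '\n') = true
          · rw [hnl]
            exact (ih (i+1) (by omega) fT' norm idxs _).1
              (by rw [pvTokNeed_true]; rw [pvTokNeed_false] at hfT; omega)
          · rw [Bool.not_eq_true] at hnl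
            rw [hnl]
            exact (ih (i+1) (by omega) fT' norm idxs _).2
              (by rw [pvTokNeed_false]; rw [pvTokNeed_false] at hfT; omega)
        · rw [Bool.not_eq_true] at hsp
          rw [if_neg (show ¬ (PySem.Chars.isspace (cs.getD i ' ') = true) by rw [hsp]; decide)]
          have hnl := pvNotSpace_ne_nl _ hsp
          rw [hnl]
          have hcol : pvColStep (norm, idxs, pending) ((i : Int), cs.getD i ' ') =
              ((if pending.isSome then norm ++ [' '] else norm) ++ [cs.getD i ' '],
               (if pending.isSome then idxs ++ [pending.getD 0] else idxs) ++ [(i : Int)], none) := by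
            simp only [pvColStep]
            rw [if_neg (show ¬ (PySem.Chars.isspace (cs.getD i ' ') = true) by rw [hsp]; decide)]
          rw [hcol]
          exact (ih (i+1) (by omega) fT' _ _ _).2
            (by rw [pvTokNeed_false]; rw [pvTokNeed_false] at hfT; omega)
      refine ⟨?_, hct⟩
      intro hfT
      by_cases hA : pvAskip cs i = true
      · -- a line-start 'continue' of A; B's skipper makes the same move
        conv_lhs => rw [pvLoopA.eq_2]
        rw [if_pos h, if_pos (by rw [hA, Bool.and_true])]
        rw [pvTok_shift cs fT i h hA hfT]
        exact (ih (i+1) (by omega) fT norm idxs pending).1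
          (by rw [pvTokNeed_true]; rw [pvTokNeed_true] at hfT; omega)
      · rw [Bool.not_eq_true] at hA
        rw [pvLoopA_true_false cs fA i norm idxs pending h hA,
          pvTok_enter cs fT i h hA hfT]
        exact hct (by rw [pvTokNeed_false]; rw [pvTokNeed_true] at hfT; omega)
    · have hn := h
      rw [pvTok_out cs fT i true hn, pvTok_out cs fT i false hn]
      constructor <;> intro _ <;> (rw [pvLoopA.eq_2, if_neg hn]; rfl)

-- ===== VERDICT (by name: the statement is the Claim_ definition above) =====
theorem build_normalized_index_py_spec : Claim_equal_build_normalized_index_py := by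
  intro md _
  show build_normalized_index_py md = build_normalized_index_py_alt md
  unfold build_normalized_index_py build_normalized_index_py_alt
  exact (pvMain md.toList md.toList.length 0 (by omega)
    (2 * md.toList.length + 2) [] [] none).1 (by rw [pvTokNeed_true]; omega)
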